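-- pv_equiv track=rewrite | github.com/chelsea-she/vibe_writing_legislation_data_analysis | utils.py | find_last_suggestion
-- ===== SOURCE A (Python) =====
-- def find_last_suggestion(text):
--     last_dollar = False
--     for i in range(len(text) - 1, -1, -1):
--         if text[i] == "$" and last_dollar:
--             return i
--         if text[i] == "$":
--             last_dollar = True
--     return 0
-- ===== SOURCE B (Python) =====
-- def find_last_suggestion(text):
--     positions = [i for i, c in enumerate(text) if c == "$"]
--     if len(positions) >= 2:
--         return positions[-2]
--     return 0
-- ===== Notes on version B (the rewrite author's own statement) =====
-- stated objective: simpler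
-- what changed: Replaces the reverse early-exit scan with a seen-one-dollar flag by a single forward pass building the full list of dollar-sign positions and selecting the second-from-last entry (0 fallback when fewer than two).
import Mathlib
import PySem

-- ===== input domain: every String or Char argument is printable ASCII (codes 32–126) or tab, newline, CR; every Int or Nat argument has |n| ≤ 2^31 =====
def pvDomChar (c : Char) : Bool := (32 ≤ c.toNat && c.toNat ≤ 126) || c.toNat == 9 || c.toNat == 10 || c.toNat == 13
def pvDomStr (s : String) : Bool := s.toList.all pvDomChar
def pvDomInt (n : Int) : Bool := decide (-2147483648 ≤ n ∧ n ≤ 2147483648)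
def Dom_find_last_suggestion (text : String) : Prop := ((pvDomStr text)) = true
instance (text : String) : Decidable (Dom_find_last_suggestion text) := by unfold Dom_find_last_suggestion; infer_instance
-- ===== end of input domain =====

-- B replaces A's reverse early-exit scan (with a seen-one-dollar flag) by one forward pass
-- collecting all '$' positions and taking the second-from-last (0 if fewer than two): simpler.


-- ===== PORT A =====
-- the for-loop over range(len(text)-1, -1, -1): fuel n = i+1, so indices n-1, …, 0;
-- text[i] is always in range here, so List.getD is exact for the Python indexing
def pvLoopA (cs : List Char) : Nat → Bool → Int
  | 0, _ => 0
  | n+1, flag =>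
    let c := cs.getD n ' '
    if c = '$' ∧ flag then (n : Int)
    else pvLoopA cs n (if c = '$' then true else flag)

def find_last_suggestion (text : String) : Int :=
  pvLoopA text.toList text.toList.length false

-- ===== PORT B =====
def find_last_suggestion_alt (text : String) : Int :=
  -- positions = [i for i, c in enumerate(text) if c == "$"]
  let positions : List Int :=
    (PySem.List.enumerate text.toList 0).foldr
      (fun p acc => if p.2 = '$' then p.1 :: acc else acc) []
  if 2 ≤ positions.length then (PySem.List.pyGet? positions (-2)).getD 0 else 0

-- ===== PRECONDITION & SPEC =====
def Spec_find_last_suggestion (text : String) (out : Int) : Prop := out = find_last_suggestion_alt text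
instance (text : String) (out : Int) : Decidable (Spec_find_last_suggestion text out) := by unfold Spec_find_last_suggestion; infer_instance

-- ===== CLAIM (what is proved, stated in full; the proofs are below) =====
def Claim_equal_find_last_suggestion : Prop := ∀ (text : String), Dom_find_last_suggestion text → Spec_find_last_suggestion text (find_last_suggestion text)

-- ===== LEMMAS AND PROOFS =====

-- ascending list of '$' indices below n, as Ints
def pvDollars (cs : List Char) (n : Nat) : List Int :=
  ((List.range n).filter (fun i => cs.getD i ' ' = '$')).map (fun i : Nat => ((i : Int)))

-- what A's loop returns: with the flag set, the last '$' below n; otherwise the second-to-last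
def pvSel (flag : Bool) (l : List Int) : Int :=
  if flag then (l.reverse[0]?).getD 0 else (l.reverse[1]?).getD 0

lemma pvLoopA_eq (cs : List Char) : ∀ (n : Nat) (flag : Bool),
    pvLoopA cs n flag = pvSel flag (pvDollars cs n) := by
  intro n
  induction n with
  | zero => intro flag; simp [pvLoopA, pvSel, pvDollars]
  | succ n ih =>
    intro flag
    have hrange : List.range (n+1) = List.range n ++ [n] := List.range_succ
    by_cases hc : cs[n]?.getD ' ' = '$'
    · have hd : pvDollars cs (n+1) = pvDollars cs n ++ [(n : Int)] := by
        simp [pvDollars, hrange, List.getD, hc]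
      cases flag with
      | true =>
        simp [pvLoopA, List.getD, hc, hd, pvSel]
      | false =>
        have : pvLoopA cs (n+1) false = pvLoopA cs n true := by
          simp [pvLoopA, List.getD, hc]
        rw [this, ih true, hd]
        simp [pvSel]
    · have hd : pvDollars cs (n+1) = pvDollars cs n := by
        simp [pvDollars, hrange, List.getD, hc]
      have : pvLoopA cs (n+1) flag = pvLoopA cs n flag := by
        simp [pvLoopA, List.getD, hc]
      rw [this, ih flag, hd]

lemma pvFold_enum (cs : List Char) : ∀ (s : Int),
    (PySem.List.enumerate cs s).foldr
      (fun p acc => if p.2 = '$' then p.1 :: acc else acc) [] =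
    ((List.range cs.length).filter (fun i => cs.getD i ' ' = '$')).map (fun i : Nat => ((i : Int) + s)) := by
  induction cs with
  | nil => intro s; simp [PySem.List.enumerate_nil]
  | cons c cs ih =>
    intro s
    rw [PySem.List.enumerate_cons, List.foldr_cons, ih (s+1)]
    have hr : List.range (c::cs).length = 0 :: (List.range cs.length).map Nat.succ := by
      simp [List.range_succ_eq_map]
    have key : ((List.range cs.length).map Nat.succ).filter
          (fun i => decide ((c::cs).getD i ' ' = '$')) =
        ((List.range cs.length).filter (fun i => decide (cs.getD i ' ' = '$'))).map Nat.succ := by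
      rw [List.filter_map]
      congr 1
    have comp : ∀ (F : List Nat),
        F.map (fun i : Nat => ((i : Int) + (s+1))) =
        (F.map Nat.succ).map (fun i : Nat => ((i : Int) + s)) := by
      intro F
      rw [List.map_map]
      apply List.map_congr_left
      intro i _
      simp [Function.comp]
      ring
    rw [hr, List.filter_cons, key, comp]
    by_cases hc : c = '$' <;> simp [hc]

lemma pvSel_pyGet (l : List Int) :
    (if 2 ≤ l.length then (PySem.List.pyGet? l (-2)).getD 0 else 0) = pvSel false l := by
  by_cases h : 2 ≤ l.length
  · rw [PySem.List.pyGet?_neg_ofNat l 2 (by omega) h]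
    simp only [pvSel, if_neg (Bool.false_ne_true)]
    have : l.reverse[1]? = l[l.length - 2]? := by
      rw [List.getElem?_reverse (by omega)]
      congr 1
    simp [h, this]
  · have hl : l.reverse.length < 2 := by simp; omega
    have : l.reverse[1]? = none := List.getElem?_eq_none (by omega)
    simp [pvSel, h, this]

-- ===== VERDICT (by name: the statement is the Claim_ definition above) =====
theorem find_last_suggestion_spec : Claim_equal_find_last_suggestion := by
  intro text _
  unfold Spec_find_last_suggestion find_last_suggestion find_last_suggestion_alt
  rw [pvLoopA_eq]
  rw [pvFold_enum]
  have hmap : ((List.range text.toList.length).filter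
        (fun i => text.toList.getD i ' ' = '$')).map (fun i : Nat => ((i : Int) + 0)) =
      pvDollars text.toList text.toList.length := by
    unfold pvDollars
    apply List.map_congr_left; intro i _; ring
  rw [hmap, pvSel_pyGet]
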